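/- GENERATED by tools/from_farm_form.py from prooffarm-gif/accepted/DGifGetExtensionNext.2/Lemmas.lean (a worked proof of the farm's unit `DGifGetExtensionNext.2`,
   accepted by the verdict) — do not edit. -/
import Gif.Spec.Units.DGifGetExtensionNext_2
import Gif.Spec.AllSegs

/-!
  Lemmas for the unit `DGifGetExtensionNext.2` (0x1098c3 … 0x109947, 31 instructions; dgif_lib.c:609-623): a body segment of a
  protected function with a call in the middle. The segment is walked in TWO STEPS that meet at the return address 0x10991d
  (`ret7`) of `InternalRead(gif, pv.Buf + 1, n)`, with a private assertion there.

      en2_byte, en2_edx   the length byte in `r14b` / `edx`, as the walker writes it, is the byte read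
      en2_windows         the windows a store of the segment may hit (own stack, `*Extension`, `pv.Buf`, `gif.Error`) are loose heap windows
      en2_carry           `HeapInv ∧ GifOK ∧ rem` through a footprint of such windows
      en2_body_carry      `Body` at a later state, from ONE footprint since the state where `Body` held
      en2_AtRet7          the assertion at `ret7`
      en2_seg_head        0x1098c3 … 0x1098a6 (the terminator arm) or … the call of InternalRead … 0x10991d: `AfterLen` → `Done ∨ en2_AtRet7`
      en2_seg_tail        0x10991d … 0x1098a6 (both arms): `en2_AtRet7` → `Done`
-/

open X86 X86.User Asan ProgX.Base ProgX.Base.Spec Gif.Spec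

set_option maxRecDepth 4000
set_option maxHeartbeats 4000000

namespace Gif.Spec.DGifGetExtensionNext_2

/-- The byte `r14b` of `movzx r14d, byte [m]`, as the walker writes it, is the byte read. -/
theorem en2_byte (n : Nat) (h : n < 256) :
    (BitVec.setWidth 8 (BitVec.zeroExtend 32 (BitVec.ofNat 8 n))).toNat = n := by
  simp only [BitVec.zeroExtend, BitVec.toNat_setWidth, BitVec.toNat_ofNat]
  omega

/-- `movzx edx, r14b`: the third argument of `InternalRead` is the byte read. -/
theorem en2_edx (n : Nat) (h : n < 256) :
    (Word.ofBV (BitVec.zeroExtend 32 (BitVec.setWidth 8 (BitVec.zeroExtend 32 (BitVec.ofNat 8 n))))).toNat = n := by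
  rw [toNat_ofBV32]
  simp only [BitVec.zeroExtend, BitVec.toNat_setWidth, BitVec.toNat_ofNat]
  omega

/-- **The windows a store of segment 2 may hit are loose heap windows**: the function's stack below the return address, the
out-pointer `*Extension`, `pv.Buf`, `gif.Error`. -/
theorem en2_windows {H : Heap} {rest : List Obj} {frames : List (Nat × FrameLayout)} {F : Forest} {R : Rd} {mem : Mem}
    {ra x : Nat} (hok : HeapOK H mem) (ho : Owns H F.owned) (hx : OutPtr H rest frames F R x 8)
    (hbase : H.base = 0x800000)
    (hroom : 0x700000 + 320 ≤ ra) (htop : ra + 8 ≤ 0x800000) (hcur : ra + 8 ≤ R.cur) :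
    ∀ w, w ∈ [(⟨ra - 320, ra⟩ : Span), ⟨x, x + 8⟩, ⟨F.pv + 88, F.pv + 344⟩, ⟨F.gif + 96, F.gif + 100⟩] →
      Loose H F R w ∧ HeapWin H w := by
  intro w hw
  have hoff := hok.offStack
  simp only [List.mem_cons, List.mem_nil_iff, or_false] at hw
  rcases hw with e | e | e | e
  · rw [e]
    refine ⟨Loose.stack hok ?_ ?_ ?_, HeapWin.offHeap hok ?_⟩
    · simp only
      omega
    · simp only
      omega
    · simp only
      omega
    · left
      simp only
      omega
  · rw [e]
    exact ⟨hx.buf.loose, hx.buf.win⟩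
  · rw [e]
    refine ⟨Loose.pvBody (Or.inr ⟨?_, ?_⟩), HeapWin.pv hok ho ?_ ?_⟩
    · simp only
      omega
    · simp only
      omega
    · simp only
      omega
    · simp only
      omega
  · rw [e]
    refine ⟨Loose.gifScalar (Or.inr (Or.inr ⟨?_, ?_⟩)), HeapWin.gif hok ho ?_ ?_⟩
    · simp only
      omega
    · simp only
      omega
    · simp only
      omega
    · simp only
      omega

/-- **The heap's invariant, the state invariant and the reader's measure through a footprint of loose heap windows** that no
shadow byte lies in. -/
theorem en2_carry {H : Heap} {rest : List Obj} {frames : List (Nat × FrameLayout)} {F : Forest} {R : Rd} {top : Nat}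
    {mem mem' : Mem} {ws : List Span} (hinv : HeapInv H rest frames top mem) (hok : GifOK H F R mem)
    (hcur : 0x700000 ≤ R.cur ∧ R.cur + 16 ≤ 0x800000) (hun : ShadowUntouched mem mem')
    (hs : Mem.SameExcept ws mem mem') (hw : ∀ w, w ∈ ws → Loose H F R w ∧ HeapWin H w) :
    HeapInv H rest frames top mem' ∧ GifOK H F R mem' ∧ rem R mem' = rem R mem := by
  refine ⟨?_, ?_, ?_⟩
  · exact hinv.sameExcept hun hs (fun w h => (hw w h).2)
  · exact hok.sameExcept hinv.heap hcur hs (fun w h => (hw w h).1)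
  · exact rem_loose hs (fun w h => (hw w h).1) hinv.heap (hok.owns.placed hinv.heap) hcur

/-- **`Body` at a later state of segment 2**: the state `s` differs from `v` (where `Body` holds) inside the function's stack below
the saved registers, `*Extension`, `pv.Buf`, `gif.Error` and the cursor only; the registers of the body are those of `v`; the
invariants are given for `s`. The six slots, the return address and the footprint since the entry are carried here, once. -/
theorem en2_body_carry {cut cut' : Word} {H : Heap} {rest : List Obj} {frames : List (Nat × FrameLayout)} {F : Forest} {R : Rd}
    {u₀ e : State} {ret : Word} {v s : State}
    (hb : DGifGetExtensionNext.Body cut H rest frames F R u₀ e ret v)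
    (hroom : 0x700000 + 320 ≤ (e.reg .rsp).toNat) (htop : (e.reg .rsp).toNat + 8 ≤ 0x800000)
    (hcur : (e.reg .rsp).toNat + 8 ≤ R.cur) (hp1 : 0x800040 ≤ F.pv) (hg1 : 0x800040 ≤ F.gif)
    (hs : Mem.SameExcept
      [⟨(e.reg .rsp).toNat - 320, (e.reg .rsp).toNat - 120⟩,
       ⟨(e.reg .rsi).toNat, (e.reg .rsi).toNat + 8⟩,
       ⟨F.pv + 88, F.pv + 344⟩,
       ⟨F.gif + 96, F.gif + 100⟩,
       ⟨R.cur, R.cur + 8⟩] v.mem s.mem)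
    (hrip : s.rip = cut') (hrsp : s.reg .rsp = e.reg .rsp - 136) (hrbx : s.reg .rbx = v.reg .rbx)
    (hr13 : s.reg .r13 = v.reg .r13) (hrbp : s.reg .rbp = v.reg .rbp)
    (hinv : HeapInv H rest (DGifGetExtensionNext.framesIn frames e) ((e.reg .rsp).toNat - 136) s.mem)
    (hok : GifOK H F R s.mem) (hrem : rem R s.mem ≤ rem R v.mem)
    (hcode : (conv u₀).code.In s.mem) (habi : (conv u₀).inv s) :
    DGifGetExtensionNext.Body cut' H rest frames F R u₀ e ret s := by
  have hxa := hb.ext_above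
  -- a slot of the saved registers misses every window of `hs`
  have hslot : ∀ off x, off ≤ 48 → 8 ≤ off → v.mem.readLE (e.reg .rsp - UInt64.ofNat off) 8 = x →
      s.mem.readLE (e.reg .rsp - UInt64.ofNat off) 8 = x := by
    intro off x h48 h8 hv
    apply slot_sameExcept hs (e.reg .rsp) off 8 x (by omega) h8 hv
    intro w hw
    simp only [List.mem_cons, List.mem_nil_iff, or_false] at hw
    rcases hw with e1 | e1 | e1 | e1 | e1
    all_goals rw [e1]
    all_goals simp only
    all_goals omega
  exact {
    entry := hb.entry
    pre := hb.pre
    ext_above := hb.ext_above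
    rip := hrip
    rsp := hrsp
    rbx := hrbx.trans hb.rbx
    r13 := hr13.trans hb.r13
    rbp := hrbp.trans hb.rbp
    slot_r15 := hslot 8 _ (by omega) (by omega) hb.slot_r15
    slot_r14 := hslot 16 _ (by omega) (by omega) hb.slot_r14
    slot_r13 := hslot 24 _ (by omega) (by omega) hb.slot_r13
    slot_r12 := hslot 32 _ (by omega) (by omega) hb.slot_r12
    slot_rbp := hslot 40 _ (by omega) (by omega) hb.slot_rbp
    slot_rbx := hslot 48 _ (by omega) (by omega) hb.slot_rbx
    slot_ra := by
      have hlt := (e.reg .rsp).toNat_lt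
      rw [hs.readLE (e.reg .rsp) 8 (by omega) ?_]
      · exact hb.slot_ra
      · intro w hw
        simp only [List.mem_cons, List.mem_nil_iff, or_false] at hw
        rcases hw with e1 | e1 | e1 | e1 | e1
        all_goals rw [e1]
        all_goals simp only
        all_goals omega
    inv := hinv
    ok := hok
    rem := Nat.le_trans hrem hb.rem
    same := by
      refine hb.same.trans (hs.mono ?_)
      intro w hw a h1 h2
      simp only [List.mem_cons, List.mem_nil_iff, or_false] at hw
      rcases hw with e1 | e1 | e1 | e1 | e1
      · rw [e1] at h1 h2
        simp only at h1 h2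
        refine ⟨⟨(e.reg .rsp).toNat - 320, (e.reg .rsp).toNat⟩, ?_, ?_, ?_⟩
        · simp only [List.mem_cons, true_or]
        · simp only
          omega
        · simp only
          omega
      · rw [e1] at h1 h2
        exact ⟨_, by simp only [List.mem_cons, true_or, or_true], h1, h2⟩
      · rw [e1] at h1 h2
        exact ⟨_, by simp only [List.mem_cons, true_or, or_true], h1, h2⟩
      · rw [e1] at h1 h2
        exact ⟨_, by simp only [List.mem_cons, true_or, or_true], h1, h2⟩
      · rw [e1] at h1 h2
        exact ⟨_, by simp only [List.mem_cons, true_or, or_true], h1, h2⟩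
    code := hcode
    abi := habi
  }

/-- **At 10991DH (ret7), `InternalRead(gif, pv.Buf + 1, n)` has returned**: `Body`; `r12d = 1` (the result so far); the length
byte `n = Buf` of the frame is at least 1; `*Extension = &pv.Buf`; `pv.Buf[0] = n`; `eax = k ≤ n` the bytes delivered, and `k = n`
means the reader advanced by `1 + n` bytes since the entry. -/
structure en2_AtRet7 (H : Heap) (rest : List Obj) (frames : List (Nat × FrameLayout)) (F : Forest) (R : Rd) (u₀ e : State)
    (ret : Word) (v : State) : Prop where
  body : DGifGetExtensionNext.Body Gif.L.DGifGetExtensionNext.ret7 H rest frames F R u₀ e ret v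
  r12 : (v.reg .r12).toNat = 1
  len_pos : 1 ≤ v.mem.readLE (e.reg .rsp - 88) 1
  ext : rd v.mem (e.reg .rsi).toNat 8 = F.pv + 88
  buf0 : rd v.mem (F.pv + 88) 1 = v.mem.readLE (e.reg .rsp - 88) 1
  count : (v.reg .rax).toNat ≤ v.mem.readLE (e.reg .rsp - 88) 1
  adv : (v.reg .rax).toNat = v.mem.readLE (e.reg .rsp - 88) 1 →
    rem R v.mem + 1 + v.mem.readLE (e.reg .rsp - 88) 1 = rem R e.mem

/-- **1098C3H … 1098A6H (the terminator) or … the call of InternalRead … 10991DH (ret7)** (dgif_lib.c:609-614). `r12d = 1`; the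
frame's byte `Buf = n` (a ghost here: the instance of InternalRead's contract is chosen with it). `n = 0`: the checked store
`*Extension = NULL`, `Done` with the first case of `BlockPost`. `n > 0`: the checked stores `*Extension = &pv.Buf` and
`pv.Buf[0] = n`, the re-load of `*Extension` (the walker reads it through the store to `pv.Buf[0]`: `*Extension` is a stack
address, `OutPtr.low`), `InternalRead(gif, pv + 89, n)`, and the private assertion at its return. -/
theorem en2_seg_head (Lay : Layout) (hLay : Lay.hi = 0x1000000) (μ : Microarch) (hμ : UserX.MicroOK μ) (u₀ : State)
    (hcode : HasCodeNat Lay u₀ Gif.L.DGifGetExtensionNext.entry Gif.Code.code_DGifGetExtensionNext.nat Gif.L.DGifGetExtensionNext.size)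
    (H : Heap) (rest : List Obj) (frames : List (Nat × FrameLayout)) (F : Forest) (R : Rd) (e : State) (ret : Word)
    (n : Nat)
    (h_InternalRead : Calls Lay μ ProgX.Base.WayInv (ProgX.Base.conv u₀) Gif.L.InternalRead.entry
      (Gif.Spec.InternalRead.spec H rest (DGifGetExtensionNext.framesIn frames e) F R n))
    (h_asan_store8_noabort : Asan.SmallCheck Lay μ ProgX.Base.WayInv (ProgX.Base.CodeOK u₀) [.rax, .rcx, .rdx] 8 ProgX.Base.L.__asan_store8_noabort.entry)
    (h_asan_store1_noabort : Asan.SmallCheck Lay μ ProgX.Base.WayInv (ProgX.Base.CodeOK u₀) [.rax, .rdx] 1 ProgX.Base.L.__asan_store1_noabort.entry)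
    (v : State) (hat : DGifGetExtensionNext.AfterLen H rest frames F R u₀ e ret v)
    (hn : v.mem.readLE (e.reg .rsp - 88) 1 = n) :
    ReachVia Lay μ ProgX.Base.WayInv v (fun w => DGifGetExtensionNext.Done H rest frames F R u₀ e ret w ∨
      en2_AtRet7 H rest frames F R u₀ e ret w) := by
  obtain ⟨hbody, hrax, hr15, hrem_eq⟩ := hat
  have he := hbody.entry
  v_entry he
  obtain ⟨henv, hrdi, hext⟩ := hbody.pre
  have w_rip := hbody.rip
  have c_rsp : v.reg .rsp = e.reg .rsp - 136 := hbody.rsp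
  have c_rbx : v.reg .rbx = e.reg .rdi := hbody.rbx
  have c_r13 : v.reg .r13 = e.reg .rsi := hbody.r13
  obtain ⟨p, c_r15⟩ : ∃ p, v.reg .r15 = p := ⟨_, rfl⟩
  rw [c_r15] at hr15
  obtain ⟨z, c_rax⟩ : ∃ z, v.reg .rax = z := ⟨_, rfl⟩
  rw [c_rax] at hrax
  have w_kept : RegsKept [.rsp] v v := RegsKept.refl _ _
  have w_eq : Mem.EqOn ProgX.Base.L.textLo ProgX.Base.L.textHi u₀.mem v.mem := ProgX.Base.conv_code_eqOn hbody.code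
  have hdf := (show abiInv _ from hbody.abi).1
  have hmx := (show abiInv _ from hbody.abi).2
  have hsse := ProgX.Base.sseOK_of_abiInv hbody.abi
  have l_buf : v.mem.readLE (e.reg .rsp - 88) 1 = n := hn
  have hn256 : n < 256 := by
    have h := X86.User.Mem.readLE_lt v.mem (e.reg .rsp - 88) 1
    rw [hn] at h
    have e8 : 2 ^ (8 * 1) = 256 := by decide
    omega
  have hcur := henv.ctx.cursor_range henv.heap.inv.shadow
  have hbase := henv.heap.base
  obtain ⟨hg1, hg2, hg3⟩ := henv.ok.gif_where henv.heap.inv.heap hbase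
  obtain ⟨hp1, hp2, hp3⟩ := henv.ok.pv_where henv.heap.inv.heap hbase
  have hxa := hbody.ext_above
  have hxl := hext.low
  -- the windows of the segment are loose heap windows
  have hwin := en2_windows (ra := (e.reg .rsp).toNat) hbody.inv.heap hbody.ok.owns hext hbase he_room he_top hcur.2.2
  -- `*Extension` and pv are live under the body's frames
  have hxl' : LiveIn (H.liveObjs ++ rest) (DGifGetExtensionNext.framesIn frames e) (e.reg .rsi).toNat 8 :=
    hext.buf.live.push_frame _
  have hpl : H.Live F.pv 24936 := hbody.ok.pv_live
  u_walk hcode [hμ.vendor] until [Gif.L.DGifGetExtensionNext.ret7, Gif.L.DGifGetExtensionNext.at_1098a6] span [ProgX.Base.L.textLo, ProgX.Base.L.textHi] side (v_side)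
  case check_1098ef =>
    -- dgif_lib.c:610 the store of `*Extension = &pv.Buf`
    have hun : ShadowUntouched v.mem s_1098ef.mem := by v_untouched
    exact hxl'.accSmall hbody.inv.shadow hun _ 8 (by decide) (by u_omega) (by u_omega)
  case check_109900 =>
    -- dgif_lib.c:611 the store of `pv.Buf[0] = n`
    have hun : ShadowUntouched v.mem s_109900.mem := by v_untouched
    have hbl := bufLive hpl rest (DGifGetExtensionNext.framesIn frames e) 0 1 (by omega)
    simp only [gfield] at hbl
    exact hbl.accSmall hbody.inv.shadow hun _ 1 (by decide) (by u_omega) (by u_omega)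
  case check_1098d4 =>
    -- dgif_lib.c:619 the store of `*Extension = NULL`
    have hun : ShadowUntouched v.mem s_1098d4.mem := by v_untouched
    exact hxl'.accSmall hbody.inv.shadow hun _ 8 (by decide) (by u_omega) (by u_omega)
  case call_inv =>
    v_inv
  case pre_109918 =>
    -- INTERNALREAD'S PRECONDITION. The stores since `v`: the spill, three return addresses, `*Extension`, `pv.Buf[0]`
    have hn1 : 1 ≤ n := by
      rw [en2_byte n hn256] at hbr_1098cf
      omega
    have hs4 : Mem.SameExcept
      [⟨(e.reg .rsp).toNat - 320, (e.reg .rsp).toNat⟩,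
       ⟨(e.reg .rsi).toNat, (e.reg .rsi).toNat + 8⟩,
       ⟨F.pv + 88, F.pv + 344⟩,
       ⟨F.gif + 96, F.gif + 100⟩] v.mem s_109918.mem := by
      rw [w_mem]
      u_same
    have hun : ShadowUntouched v.mem s_109918.mem := by v_untouched
    obtain ⟨hinv4, hok4, hrem4⟩ := en2_carry hbody.inv hbody.ok ⟨hcur.1, hcur.2.1⟩ hun hs4 hwin
    have henv' : Env H rest (DGifGetExtensionNext.framesIn frames e) F R s_109918 := by
      refine henv.at_call' (lo := 0x700000) (hi := 0x700000) hinv4 hok4 (Mem.SameExcept.refl _ _) (by omega) (by omega) ?_ ?_ ?_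
      · rw [w_rsp]
        u_omega
      · rw [w_rsp]
        u_omega
      · rw [w_rsp]
        u_omega
    have e89 : (p + 89).toNat = F.pv + 89 := by u_omega
    have hbuf : BufOK H rest (DGifGetExtensionNext.framesIn frames e) F R (s_109918.reg .rsi).toNat n := by
      rw [w_rsi, e89]
      have hbl := bufLive hpl rest (DGifGetExtensionNext.framesIn frames e) 1 n (by omega)
      simp only [gfield] at hbl
      refine ⟨hbl, Loose.pvBody (Or.inr ⟨?_, ?_⟩), HeapWin.pv hbody.inv.heap hbody.ok.owns ?_ ?_, ?_⟩
      · simp only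
        omega
      · simp only
        omega
      · simp only
        omega
      · simp only
        omega
      · omega
    refine ⟨henv', ?_, ?_, hn1, by omega, hbuf⟩
    · rw [w_rdi]
      exact hrdi
    · rw [w_rdx, en2_edx n hn256]
      omega
  · -- 0x10991d (ret7): INTERNALREAD HAS RETURNED. Its post: `k` bytes delivered
    obtain ⟨k, hk1, hk2, hk3, hk4, hk5, hback⟩ :
      ReadPost H rest (DGifGetExtensionNext.framesIn frames e) F R n s_109918 s_109918r := w_post
    have hn1 : 1 ≤ n := by
      rw [en2_byte n hn256] at hbr_1098cf
      omega
    have e88 : (p + 88).toNat = F.pv + 88 := by u_omega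
    have e89 : (p + 89).toNat = F.pv + 89 := by u_omega
    -- the reader at InternalRead's entry is where it was at `v`
    have hs4 : Mem.SameExcept
      [⟨(e.reg .rsp).toNat - 320, (e.reg .rsp).toNat⟩,
       ⟨(e.reg .rsi).toNat, (e.reg .rsi).toNat + 8⟩,
       ⟨F.pv + 88, F.pv + 344⟩,
       ⟨F.gif + 96, F.gif + 100⟩] v.mem s_109918.mem := by
      rw [w_mem_109918]
      u_same
    have hrem0 : rem R s_109918.mem = rem R v.mem :=
      rem_loose hs4 (fun w h => (hwin w h).1) hbody.inv.heap (hbody.ok.owns.placed hbody.inv.heap) ⟨hcur.1, hcur.2.1⟩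
    have e_top : (s_109918.reg .rsp).toNat + 8 = (e.reg .rsp).toNat - 136 := by
      rw [w_rsp_109918]
      u_omega
    -- what was stored before the call, read at InternalRead's entry: `*Extension`, `pv.Buf[0]`, the frame's byte `Buf`
    have hpx : s_109918.mem.readLE (e.reg .rsi) 8 = (p + 88).toNat := by
      rw [w_mem_109918]
      u_read
    have hpb : s_109918.mem.readLE (p + 88) 1 = n := by
      rw [w_mem_109918]
      rw [en2_byte n hn256]
      u_read
    have hpn : s_109918.mem.readLE (e.reg .rsp - 88) 1 = n := by
      rw [w_mem_109918]
      u_frame l_buf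
    -- the callee's footprint in terms of `v` (`w_same : SameExcept […] <the nest over v.mem> s_109918r.mem`)
    v_after_call w_rsp_109918 w_mem_109918
    simp only [w_rsi_109918] at w_same
    -- the three reads through InternalRead's footprint (the buffer `pv.Buf[1 …]`, the cursor, the stack below)
    rw [w_mem_109918] at hpx hpb hpn
    -- `*Extension` misses the cursor (it is loose)
    have hxc : (e.reg .rsi).toNat + 8 ≤ R.cur ∨ R.cur + 16 ≤ (e.reg .rsi).toNat :=
      hext.buf.loose.off_cursor henv.heap.inv.heap (henv.ok.owns.placed henv.heap.inv.heap) ⟨hcur.1, hcur.2.1⟩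
    have hsx : s_109918r.mem.readLE (e.reg .rsi) 8 = (p + 88).toNat := by u_frame hpx
    have hsb : s_109918r.mem.readLE (p + 88) 1 = n := by u_frame hpb
    have hsn : s_109918r.mem.readLE (e.reg .rsp - 88) 1 = n := by u_frame hpn
    -- the footprint since `v`
    have hs5 : Mem.SameExcept
      [⟨(e.reg .rsp).toNat - 320, (e.reg .rsp).toNat - 120⟩,
       ⟨(e.reg .rsi).toNat, (e.reg .rsi).toNat + 8⟩,
       ⟨F.pv + 88, F.pv + 344⟩,
       ⟨F.gif + 96, F.gif + 100⟩,
       ⟨R.cur, R.cur + 8⟩] v.mem s_109918r.mem := by u_same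
    -- the heap's invariant comes back with the clean stack at the callee's `rsp + 8` = the body's `rsp`
    have hinv1 : HeapInv H rest (DGifGetExtensionNext.framesIn frames e) ((e.reg .rsp).toNat - 136) s_109918r.mem := by
      rw [← e_top]
      exact hback.inv
    have hrem1 : rem R s_109918r.mem ≤ rem R v.mem := by
      rw [← hrem0]
      exact hback.rem
    have hbody1 : DGifGetExtensionNext.Body Gif.L.DGifGetExtensionNext.ret7 H rest frames F R u₀ e ret s_109918r :=
      en2_body_carry hbody he_room he_top hcur.2.2 hp1 hg1 hs5 w_rip w_rsp (w_kept.get .rbx rfl) (w_kept.get .r13 rfl)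
        (w_kept.get .rbp rfl) hinv1 hback.ok hrem1 w_code w_inv
    refine ReachVia.done (Or.inr ?_)
    exact {
      body := hbody1
      r12 := by
        rw [w_r12, toNat_ofBV32, toNat_part32, hrax]
      len_pos := by
        rw [hsn]
        exact hn1
      ext := by
        rw [← rd_eq_readLE s_109918r.mem (e.reg .rsi) (e.reg .rsi).toNat 8 rfl, hsx]
        exact e88
      buf0 := by
        rw [← rd_eq_readLE s_109918r.mem (p + 88) (F.pv + 88) 1 e88, hsb, hsn]
      count := by
        rw [hk4, hsn]
        exact hk1
      adv := by
        intro hkn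
        rw [hk4, hsn] at hkn
        rw [hsn, hk5, hrem0]
        rw [hrem0] at hk2
        omega
    }
  · -- 0x1098a6 FROM 0x1098e1: the terminator, `*Extension = NULL`, r12d = 1
    have hs4 : Mem.SameExcept
      [⟨(e.reg .rsp).toNat - 320, (e.reg .rsp).toNat⟩,
       ⟨(e.reg .rsi).toNat, (e.reg .rsi).toNat + 8⟩,
       ⟨F.pv + 88, F.pv + 344⟩,
       ⟨F.gif + 96, F.gif + 100⟩] v.mem s_1098e1.mem := by
      rw [w_mem]
      u_same
    have hs5 : Mem.SameExcept
      [⟨(e.reg .rsp).toNat - 320, (e.reg .rsp).toNat - 120⟩,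
       ⟨(e.reg .rsi).toNat, (e.reg .rsi).toNat + 8⟩,
       ⟨F.pv + 88, F.pv + 344⟩,
       ⟨F.gif + 96, F.gif + 100⟩,
       ⟨R.cur, R.cur + 8⟩] v.mem s_1098e1.mem := by
      rw [w_mem]
      u_same
    have hun : ShadowUntouched v.mem s_1098e1.mem := by v_untouched
    obtain ⟨hinv4, hok4, hrem4⟩ := en2_carry hbody.inv hbody.ok ⟨hcur.1, hcur.2.1⟩ hun hs4 hwin
    have habi : (conv u₀).inv s_1098e1 := by
      refine ProgX.Base.abiInv_of ?_ ?_
      · rw [w_flags]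
        exact w_df_1098d4
      · rw [w_mxcsr]
        exact hmx
    have hbody1 : DGifGetExtensionNext.Body Gif.L.DGifGetExtensionNext.at_1098a6 H rest frames F R u₀ e ret s_1098e1 :=
      en2_body_carry hbody he_room he_top hcur.2.2 hp1 hg1 hs5 w_rip w_rsp (w_kept.get .rbx rfl) (w_kept.get .r13 rfl)
        (w_kept.get .rbp rfl) hinv4 hok4 (Nat.le_of_eq hrem4) (ProgX.Base.conv_code_in w_eq) habi
    have hr12 : (s_1098e1.reg .r12).toNat = 1 := by
      rw [w_r12, toNat_ofBV32, toNat_part32, hrax]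
    refine ReachVia.done (Or.inl ?_)
    exact {
      body := hbody1
      res := Or.inl hr12
      ok1 := by
        intro _
        left
        refine ⟨?_, ?_⟩
        · rw [w_mem, rd_writeLE_same _ (e.reg .rsi) 8 0 _ rfl (by decide)]
        · rw [hrem4]
          exact hrem_eq
    }

/-- **10991DH (ret7) … 1098A6H** (dgif_lib.c:614-616): `cmp` of the count delivered with `Buf` re-read from the frame; equal: `Done`
with the second case of `BlockPost`; else the checked store of `gif.Error = 102`, `r12d = 0`. -/
theorem en2_seg_tail (Lay : Layout) (hLay : Lay.hi = 0x1000000) (μ : Microarch) (hμ : UserX.MicroOK μ) (u₀ : State)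
    (hcode : HasCodeNat Lay u₀ Gif.L.DGifGetExtensionNext.entry Gif.Code.code_DGifGetExtensionNext.nat Gif.L.DGifGetExtensionNext.size)
    (H : Heap) (rest : List Obj) (frames : List (Nat × FrameLayout)) (F : Forest) (R : Rd) (e : State) (ret : Word)
    (h_asan_store4_noabort : Asan.SmallCheck Lay μ ProgX.Base.WayInv (ProgX.Base.CodeOK u₀) [.rax, .rcx, .rdx] 4 ProgX.Base.L.__asan_store4_noabort.entry)
    (v : State) (hat : en2_AtRet7 H rest frames F R u₀ e ret v) :
    ReachVia Lay μ ProgX.Base.WayInv v (DGifGetExtensionNext.Done H rest frames F R u₀ e ret) := by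
  obtain ⟨hbody, hr12, hlen, hextv, hbuf0, hcount, hadv⟩ := hat
  have he := hbody.entry
  v_entry he
  obtain ⟨henv, hrdi, hext⟩ := hbody.pre
  have w_rip := hbody.rip
  have c_rsp : v.reg .rsp = e.reg .rsp - 136 := hbody.rsp
  have c_rbx : v.reg .rbx = e.reg .rdi := hbody.rbx
  obtain ⟨z, c_rax⟩ : ∃ z, v.reg .rax = z := ⟨_, rfl⟩
  rw [c_rax] at hcount hadv
  obtain ⟨n, l_buf⟩ : ∃ n, v.mem.readLE (e.reg .rsp - 88) 1 = n := ⟨_, rfl⟩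
  rw [l_buf] at hlen hbuf0 hcount hadv
  have hn256 : n < 256 := by
    have h := X86.User.Mem.readLE_lt v.mem (e.reg .rsp - 88) 1
    rw [l_buf] at h
    have e8 : 2 ^ (8 * 1) = 256 := by decide
    omega
  have w_kept : RegsKept [.rsp] v v := RegsKept.refl _ _
  have w_eq : Mem.EqOn ProgX.Base.L.textLo ProgX.Base.L.textHi u₀.mem v.mem := ProgX.Base.conv_code_eqOn hbody.code
  have hdf := (show abiInv _ from hbody.abi).1
  have hmx := (show abiInv _ from hbody.abi).2
  have hsse := ProgX.Base.sseOK_of_abiInv hbody.abi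
  have hcur := henv.ctx.cursor_range henv.heap.inv.shadow
  have hbase := henv.heap.base
  obtain ⟨hg1, hg2, hg3⟩ := henv.ok.gif_where henv.heap.inv.heap hbase
  obtain ⟨hp1, hp2, hp3⟩ := henv.ok.pv_where henv.heap.inv.heap hbase
  have hxa := hbody.ext_above
  have hxl := hext.low
  have hwin := en2_windows (ra := (e.reg .rsp).toNat) hbody.inv.heap hbody.ok.owns hext hbase he_room he_top hcur.2.2
  have hgl : LiveIn (H.liveObjs ++ rest) (DGifGetExtensionNext.framesIn frames e) F.gif 120 :=
    hbody.ok.gif_live.liveIn rest _ (Nat.le_refl _) (Nat.le_refl _)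
  u_walk hcode [hμ.vendor] until [Gif.L.DGifGetExtensionNext.at_1098a6] span [ProgX.Base.L.textLo, ProgX.Base.L.textHi] side (v_side)
  case check_109930 =>
    -- dgif_lib.c:615 the store of `gif.Error`
    have hun : ShadowUntouched v.mem s_109930.mem := by v_untouched
    exact hgl.accSmall hbody.inv.shadow hun _ 4 (by decide) (by u_omega) (by u_omega)
  · -- 0x1098a6 FROM 0x109926: all `n` bytes were read; nothing was stored since `ret7`
    have hzn : z.toNat = n := by
      rw [toNat_part32] at hbr_109926
      simp only [BitVec.zeroExtend, BitVec.toNat_setWidth, BitVec.toNat_ofNat, Width.bits] at hbr_109926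
      omega
    have hs5 : Mem.SameExcept
      [⟨(e.reg .rsp).toNat - 320, (e.reg .rsp).toNat - 120⟩,
       ⟨(e.reg .rsi).toNat, (e.reg .rsi).toNat + 8⟩,
       ⟨F.pv + 88, F.pv + 344⟩,
       ⟨F.gif + 96, F.gif + 100⟩,
       ⟨R.cur, R.cur + 8⟩] v.mem s_109926.mem := by
      rw [w_mem]
      exact Mem.SameExcept.refl _ _
    have habi : (conv u₀).inv s_109926 := by
      refine ProgX.Base.abiInv_of ?_ ?_
      · rw [w_flags]
        simp only [X86.User.df_setStatus]
        exact hdf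
      · rw [w_mxcsr]
        exact hmx
    have hinv1 : HeapInv H rest (DGifGetExtensionNext.framesIn frames e) ((e.reg .rsp).toNat - 136) s_109926.mem := by
      rw [w_mem]
      exact hbody.inv
    have hok1 : GifOK H F R s_109926.mem := by
      rw [w_mem]
      exact hbody.ok
    have hrem1 : rem R s_109926.mem ≤ rem R v.mem := by
      rw [w_mem]
      exact Nat.le_refl _
    have hbody1 : DGifGetExtensionNext.Body Gif.L.DGifGetExtensionNext.at_1098a6 H rest frames F R u₀ e ret s_109926 :=
      en2_body_carry hbody he_room he_top hcur.2.2 hp1 hg1 hs5 w_rip w_rsp (w_kept.get .rbx rfl) (w_kept.get .r13 rfl)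
        (w_kept.get .rbp rfl) hinv1 hok1 hrem1 (ProgX.Base.conv_code_in w_eq) habi
    have hr12' : (s_109926.reg .r12).toNat = 1 := by
      rw [w_kept.get .r12 rfl]
      exact hr12
    refine ReachVia.done ?_
    exact {
      body := hbody1
      res := Or.inl hr12'
      ok1 := by
        intro _
        right
        rw [w_mem, hbuf0]
        exact ⟨hextv, hlen, by omega, hadv hzn⟩
    }
  · -- 0x1098a6 FROM 0x109942: a short read, `gif.Error = D_GIF_ERR_READ_FAILED` stored, r12d = 0
    have hs4 : Mem.SameExcept
      [⟨(e.reg .rsp).toNat - 320, (e.reg .rsp).toNat⟩,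
       ⟨(e.reg .rsi).toNat, (e.reg .rsi).toNat + 8⟩,
       ⟨F.pv + 88, F.pv + 344⟩,
       ⟨F.gif + 96, F.gif + 100⟩] v.mem s_109942.mem := by
      rw [w_mem]
      u_same
    have hs5 : Mem.SameExcept
      [⟨(e.reg .rsp).toNat - 320, (e.reg .rsp).toNat - 120⟩,
       ⟨(e.reg .rsi).toNat, (e.reg .rsi).toNat + 8⟩,
       ⟨F.pv + 88, F.pv + 344⟩,
       ⟨F.gif + 96, F.gif + 100⟩,
       ⟨R.cur, R.cur + 8⟩] v.mem s_109942.mem := by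
      rw [w_mem]
      u_same
    have hun : ShadowUntouched v.mem s_109942.mem := by v_untouched
    obtain ⟨hinv4, hok4, hrem4⟩ := en2_carry hbody.inv hbody.ok ⟨hcur.1, hcur.2.1⟩ hun hs4 hwin
    have habi : (conv u₀).inv s_109942 := by
      refine ProgX.Base.abiInv_of ?_ ?_
      · rw [w_flags]
        exact w_df_109930
      · rw [w_mxcsr]
        exact hmx
    have hbody1 : DGifGetExtensionNext.Body Gif.L.DGifGetExtensionNext.at_1098a6 H rest frames F R u₀ e ret s_109942 :=
      en2_body_carry hbody he_room he_top hcur.2.2 hp1 hg1 hs5 w_rip w_rsp (w_kept.get .rbx rfl) (w_kept.get .r13 rfl)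
        (w_kept.get .rbp rfl) hinv4 hok4 (Nat.le_of_eq hrem4) (ProgX.Base.conv_code_in w_eq) habi
    have hr12' : (s_109942.reg .r12).toNat = 0 := by
      rw [w_r12]
      decide
    refine ReachVia.done ?_
    exact {
      body := hbody1
      res := Or.inr hr12'
      ok1 := by
        intro h1
        rw [hr12'] at h1
        exact absurd h1 (by decide)
    }

end Gif.Spec.DGifGetExtensionNext_2
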